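-- pv_equiv track=rewrite | github.com/lcliuchen123/data-structure | bi_shi/jing_dong.py | get_min_number
-- ===== SOURCE A (Python) =====
-- def get_min_number(n,string):
--     if n==0:
--         return 0
--     number = 1
--     flag = True
--     if string[0] >= 'A' and string[0]<= 'Z':
--         flag = False
--         number =2
--     for i in range(1,n):
--         if flag:
--             if string[i] >= 'a' and string[i] <= 'z':
--                 number += 1
--             else:
--                 flag= False
--                 number += 2
--         else:
--             if string[i] >= 'a' and string[i] <= 'z':
--                 number += 2
--             else:
--                 flag = False
--                 number += 1
--     return number
-- ===== SOURCE B (Python) =====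
-- def get_min_number(n, string):
--     if n == 0:
--         return 0
--     p = None
--     for i in range(n):
--         c = string[i]
--         if (i == 0 and 'A' <= c <= 'Z') or (i > 0 and not ('a' <= c <= 'z')):
--             p = i
--             break
--     if p is None:
--         return n
--     return n + 1 + sum(1 for i in range(p + 1, n) if 'a' <= string[i] <= 'z')
-- ===== Notes on version B (the rewrite author's own statement) =====
-- stated objective: alternative
-- what changed: Replaces A's stateful flag/counter loop by finding the single flip index p (the flag never returns to True) and computing the closed form n + 1 + (count of lowercase letters after p), or n if no flip occurs.
-- outside the precondition, e.g. on get_min_number(-1, 'a'): A returns 1, B returns -1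
import Mathlib
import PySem

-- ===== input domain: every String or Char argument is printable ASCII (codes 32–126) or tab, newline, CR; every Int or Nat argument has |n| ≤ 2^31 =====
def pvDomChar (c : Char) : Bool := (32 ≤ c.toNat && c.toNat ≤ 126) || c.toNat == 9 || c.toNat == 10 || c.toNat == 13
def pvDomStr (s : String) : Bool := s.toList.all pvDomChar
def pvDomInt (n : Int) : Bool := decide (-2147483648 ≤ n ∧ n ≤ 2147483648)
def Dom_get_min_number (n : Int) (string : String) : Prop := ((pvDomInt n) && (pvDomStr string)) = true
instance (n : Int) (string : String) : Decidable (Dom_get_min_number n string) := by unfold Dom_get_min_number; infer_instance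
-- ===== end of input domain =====

-- B finds the single flag-flip index and uses the closed form n + 1 + (lowercase count after the flip),
-- instead of A's stateful flag/counter loop; same cost, different decomposition (return-value equivalence on Pre_).


-- ===== PORT A =====
-- string[i] (Pre_ guarantees the index is in range; the ' ' default is never reached inside Pre_)
def pvCharAt (s : String) (i : Int) : Char := (PySem.Str.pyGet? s i).getD ' '

-- the body of A's for-loop over state (number, flag)
def pvAStep (s : String) (st : Int × Bool) (i : Int) : Int × Bool :=
  let c := pvCharAt s i
  if st.2 then
    if 'a' ≤ c ∧ c ≤ 'z' then (st.1 + 1, st.2) else (st.1 + 2, false)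
  else
    if 'a' ≤ c ∧ c ≤ 'z' then (st.1 + 2, st.2) else (st.1 + 1, false)

def get_min_number (n : Int) (string : String) : Int :=
  if n = 0 then 0
  else
    ((PySem.List.pyRange 1 n 1).foldl (pvAStep string)
      (if 'A' ≤ pvCharAt string 0 ∧ pvCharAt string 0 ≤ 'Z' then (2, false) else (1, true))).1

-- ===== PORT B =====
-- first index i in the list with the flip condition ((i==0 and uppercase) or (i>0 and not lowercase))
def pvBFind (s : String) : List Int → Option Int
  | [] => none
  | i :: rest =>
    let c := pvCharAt s i
    if (i = 0 ∧ 'A' ≤ c ∧ c ≤ 'Z') ∨ (0 < i ∧ ¬('a' ≤ c ∧ c ≤ 'z')) then some i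
    else pvBFind s rest

def get_min_number_alt (n : Int) (string : String) : Int :=
  if n = 0 then 0
  else
    match pvBFind string (PySem.List.pyRange 0 n 1) with
    | none => n
    | some p =>
        n + 1 + (PySem.List.pyRange (p + 1) n 1).foldl
          (fun acc i => if 'a' ≤ pvCharAt string i ∧ pvCharAt string i ≤ 'z' then acc + 1 else acc) 0

-- ===== PRECONDITION & SPEC =====
-- Pre_ excludes n > len(string), where A raises IndexError, and negative n (outside the natural
-- domain of a count), where A's return of 1 or 2 ignoring n is an accident of reading string[0]
-- before its empty loop.
def Pre_get_min_number (n : Int) (string : String) : Prop :=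
  0 ≤ n ∧ n ≤ PySem.Str.len string
instance (n : Int) (string : String) : Decidable (Pre_get_min_number n string) := by
  unfold Pre_get_min_number; infer_instance
def pvWitness_get_min_number : Int × String := (4, "aBcd")

def Spec_get_min_number (n : Int) (string : String) (out : Int) : Prop := out = get_min_number_alt n string
instance (n : Int) (string : String) (out : Int) : Decidable (Spec_get_min_number n string out) := by unfold Spec_get_min_number; infer_instance

-- ===== CLAIM (what is proved, stated in full; the proofs are below) =====
def Claim_equal_get_min_number : Prop := ∀ (n : Int) (string : String), Dom_get_min_number n string → Pre_get_min_number n string → Spec_get_min_number n string (get_min_number n string)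

-- ===== LEMMAS AND PROOFS =====

-- lowercase count, the recursive shape of B's sum
def pvCnt (s : String) : List Int → Int
  | [] => 0
  | i :: rest => (if 'a' ≤ pvCharAt s i ∧ pvCharAt s i ≤ 'z' then 1 else 0) + pvCnt s rest

theorem pvCnt_foldl (s : String) (L : List Int) (acc : Int) :
    L.foldl (fun acc i => if 'a' ≤ pvCharAt s i ∧ pvCharAt s i ≤ 'z' then acc + 1 else acc) acc
      = acc + pvCnt s L := by
  induction L generalizing acc with
  | nil => simp [pvCnt]
  | cons i rest ih =>
    simp only [List.foldl_cons, pvCnt]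
    rw [ih]
    split_ifs <;> ring

-- once the flag is False it stays False; each element adds 1, plus 1 more if lowercase
theorem pvA_false (s : String) (L : List Int) : ∀ m : Int,
    L.foldl (pvAStep s) (m, false) = (m + L.length + pvCnt s L, false) := by
  induction L with
  | nil => intro m; simp [pvCnt]
  | cons i rest ih =>
    intro m
    by_cases h : 'a' ≤ pvCharAt s i ∧ pvCharAt s i ≤ 'z'
    · have hs : pvAStep s (m, false) i = (m + 2, false) := by simp [pvAStep, h]
      rw [List.foldl_cons, hs, ih]
      simp only [pvCnt, if_pos h, List.length_cons, Prod.mk.injEq]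
      exact ⟨by push_cast; ring, trivial⟩
    · have hs : pvAStep s (m, false) i = (m + 1, false) := by simp [pvAStep, h]
      rw [List.foldl_cons, hs, ih]
      simp only [pvCnt, if_neg h, List.length_cons, Prod.mk.injEq]
      exact ⟨by push_cast; ring, trivial⟩

-- the true-flag phase: number equals the next index a; the first non-lowercase index flips
theorem pvA_true (s : String) (n : Int) (k : Nat) :
    ∀ a : Int, 1 ≤ a → n - a = (k : Int) →
    ((PySem.List.pyRange a n 1).foldl (pvAStep s) (a, true)).1 =
      (match pvBFind s (PySem.List.pyRange a n 1) with
       | none => n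
       | some p => n + 1 + pvCnt s (PySem.List.pyRange (p + 1) n 1)) := by
  induction k with
  | zero =>
    intro a _ hk
    have hna : n ≤ a := by omega
    rw [PySem.List.pyRange_one_eq_nil hna]
    simp [pvBFind]; omega
  | succ k ih =>
    intro a ha hk
    have han : a < n := by omega
    rw [PySem.List.pyRange_one_cons han]
    by_cases h : 'a' ≤ pvCharAt s a ∧ pvCharAt s a ≤ 'z'
    · -- lowercase: stay in the true phase
      have ha0 : ¬(a = 0) := by omega
      have hbf : pvBFind s (a :: PySem.List.pyRange (a + 1) n 1) =
          pvBFind s (PySem.List.pyRange (a + 1) n 1) := by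
        simp [pvBFind, ha0, h]
      have hstep : pvAStep s (a, true) a = (a + 1, true) := by simp [pvAStep, h]
      rw [List.foldl_cons, hstep, hbf]
      exact ih (a + 1) (by omega) (by omega)
    · -- not lowercase: flip here
      have ha' : (0 : Int) < a := by omega
      have hbf : pvBFind s (a :: PySem.List.pyRange (a + 1) n 1) = some a := by
        simp [pvBFind, ha', h]
      have hstep : pvAStep s (a, true) a = (a + 2, false) := by simp [pvAStep, h]
      rw [List.foldl_cons, hstep, hbf, pvA_false]
      show a + 2 + ((PySem.List.pyRange (a + 1) n 1).length : Int) +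
          pvCnt s (PySem.List.pyRange (a + 1) n 1) =
        n + 1 + pvCnt s (PySem.List.pyRange (a + 1) n 1)
      rw [PySem.List.length_pyRange_one]
      omega

-- ===== VERDICT (by name: the statement is the Claim_ definition above) =====
theorem get_min_number_spec : Claim_equal_get_min_number := by
  intro n s _ hpre
  obtain ⟨hn0, _⟩ := hpre
  unfold Spec_get_min_number get_min_number get_min_number_alt
  by_cases hz : n = 0
  · simp [hz]
  · have hn1 : 1 ≤ n := by omega
    rw [if_neg hz, if_neg hz]
    have hcons := PySem.List.pyRange_one_cons (show (0 : Int) < n by omega)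
    by_cases hu : 'A' ≤ pvCharAt s 0 ∧ pvCharAt s 0 ≤ 'Z'
    · -- uppercase first char: flip at index 0
      have hbf : pvBFind s (PySem.List.pyRange 0 n 1) = some 0 := by
        rw [hcons]; simp [pvBFind, hu]
      rw [if_pos hu, hbf, pvA_false]
      show (2 : Int) + ((PySem.List.pyRange 1 n 1).length : Int) +
          pvCnt s (PySem.List.pyRange 1 n 1) =
        n + 1 + (PySem.List.pyRange (0 + 1) n 1).foldl
          (fun acc i => if 'a' ≤ pvCharAt s i ∧ pvCharAt s i ≤ 'z' then acc + 1 else acc) 0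
      rw [PySem.List.length_pyRange_one, pvCnt_foldl]
      simp only [zero_add]
      omega
    · -- non-uppercase first char: true phase starts at index 1 with number = 1
      have hbf : pvBFind s (PySem.List.pyRange 0 n 1) =
          pvBFind s (PySem.List.pyRange 1 n 1) := by
        rw [hcons]; simp [pvBFind, hu]
      rw [if_neg hu, hbf,
        pvA_true s n (n - 1).toNat 1 (le_refl 1) (by omega)]
      rcases hfind : pvBFind s (PySem.List.pyRange 1 n 1) with _ | p
      · rfl
      · show n + 1 + pvCnt s (PySem.List.pyRange (p + 1) n 1) =
          n + 1 + (PySem.List.pyRange (p + 1) n 1).foldl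
            (fun acc i => if 'a' ≤ pvCharAt s i ∧ pvCharAt s i ≤ 'z' then acc + 1 else acc) 0
        rw [pvCnt_foldl]
        omega
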